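-- pv_equiv track=rewrite | github.com/Edems10/leet-code | 2215.Find the Difference of Two Arrays/sol.py | get_seen_values
-- ===== SOURCE A (Python) =====
-- from typing import List
--
-- def get_seen_values(
--     numbers: List[int], numbers2: List[int]
-- ) -> dict[int, [int, int]]:
--     seen = {}
--     for number in numbers:
--         if not seen.get(number):
--             seen[number] = [1]
--     for number in numbers2:
--         if not seen.get(number):
--             seen[number] = [2]
--         else:
--             if seen.get(number) == [1]:
--                 seen[number] = [1, 2]
--     return seen
-- ===== SOURCE B (Python) =====
-- def get_seen_values(numbers, numbers2):
--     # Tag each distinct value by where its first and last occurrences fall in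
--     # the concatenation: first index < len(numbers) means it is in numbers,
--     # last index >= len(numbers) means it is in numbers2.
--     combined = numbers + numbers2
--     first = {}
--     last = {}
--     for i, n in enumerate(combined):
--         if n not in first:
--             first[n] = i
--         last[n] = i
--     cut = len(numbers)
--     return {n: ([1] if i < cut else []) + ([2] if last[n] >= cut else [])
--             for n, i in first.items()}
-- ===== Notes on version B (the rewrite author's own statement) =====
-- stated objective: alternative
-- what changed: B computes first- and last-occurrence indices of every value in the concatenation numbers+numbers2 in one pass and derives each tag arithmetically from the boundary len(numbers) (first index < cut => tag 1, last index >= cut => tag 2), replacing A's two-loop incremental dict with value-inspecting conditional updates.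
import Mathlib
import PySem

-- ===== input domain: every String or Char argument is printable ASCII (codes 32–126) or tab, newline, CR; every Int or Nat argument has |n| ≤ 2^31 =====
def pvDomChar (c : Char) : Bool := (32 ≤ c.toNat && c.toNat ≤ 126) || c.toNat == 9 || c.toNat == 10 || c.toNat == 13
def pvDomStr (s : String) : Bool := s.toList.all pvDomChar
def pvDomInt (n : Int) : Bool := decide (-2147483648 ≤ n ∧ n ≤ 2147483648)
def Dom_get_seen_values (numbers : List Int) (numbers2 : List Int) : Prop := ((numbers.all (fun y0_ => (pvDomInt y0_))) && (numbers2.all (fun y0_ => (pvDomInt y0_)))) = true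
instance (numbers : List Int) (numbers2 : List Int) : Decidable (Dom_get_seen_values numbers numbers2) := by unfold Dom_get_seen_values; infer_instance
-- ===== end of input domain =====

-- B replaces A's two loops of value-inspecting conditional dict updates by a single pass
-- computing first/last occurrence indices in numbers ++ numbers2 and deriving each tag by
-- comparing them with the boundary len(numbers) (alternative algorithm; same return value).

-- ===== PORT A =====
-- truthiness of seen.get(number): None and [] are falsy, a non-empty list is truthy
def pvTruthy (o : Option (List Int)) : Bool :=
  match o with
  | none => false
  | some v => !v.isEmpty

def get_seen_values (numbers : List Int) (numbers2 : List Int) : List (Int × List Int) :=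
  let seen : PySem.Dict Int (List Int) := PySem.Dict.empty
  let seen := numbers.foldl (fun d number =>
    if !(pvTruthy (d.get? number)) then d.insert number [1] else d) seen
  let seen := numbers2.foldl (fun d number =>
    if !(pvTruthy (d.get? number)) then d.insert number [2]
    else if d.get? number = some [1] then d.insert number [1, 2]
    else d) seen
  seen.items

-- ===== PORT B =====
def get_seen_values_alt (numbers : List Int) (numbers2 : List Int) : List (Int × List Int) :=
  let combined := numbers ++ numbers2
  -- the single for-loop carries both dicts (first, last) as its state
  let fl := (PySem.List.enumerate combined 0).foldl
    (fun (fl : PySem.Dict Int Int × PySem.Dict Int Int) p =>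
      let fl := if fl.1.contains p.2 then fl else (fl.1.insert p.2 p.1, fl.2)
      (fl.1, fl.2.insert p.2 p.1))
    (PySem.Dict.empty, PySem.Dict.empty)
  let cut : Int := numbers.length
  -- last[n]: every key of `first` is a key of `last`, so the KeyError branch is
  -- unreachable; getD's default is never used
  fl.1.items.map (fun q =>
    (q.1, (if q.2 < cut then [1] else []) ++ (if cut ≤ fl.2.getD q.1 0 then [2] else [])))

-- ===== PRECONDITION & SPEC =====
def Spec_get_seen_values (numbers : List Int) (numbers2 : List Int) (out : List (Int × List Int)) : Prop := out = get_seen_values_alt numbers numbers2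
instance (numbers : List Int) (numbers2 : List Int) (out : List (Int × List Int)) : Decidable (Spec_get_seen_values numbers numbers2 out) := by unfold Spec_get_seen_values; infer_instance

-- ===== CLAIM (what is proved, stated in full; the proofs are below) =====
def Claim_equal_get_seen_values : Prop := ∀ (numbers : List Int) (numbers2 : List Int), Dom_get_seen_values numbers numbers2 → Spec_get_seen_values numbers numbers2 (get_seen_values numbers numbers2)

-- ===== LEMMAS AND PROOFS =====

-- ---- A-side characterisation: the dict's item list after processing all of `numbers`
-- ---- and the prefix `ys` of `numbers2`
def pvState (S1 ys : List Int) : List (Int × List Int) :=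
  (S1.map fun n => (n, if ys.contains n then [1, 2] else [1])) ++
    (((PySem.List.dedup ys).filter fun n => !S1.contains n).map fun n => (n, ([2] : List Int)))

theorem get?_mk_map (L : List Int) (f : Int → List Int) (n : Int) :
    (PySem.Dict.mk (L.map fun m => (m, f m))).get? n = if n ∈ L then some (f n) else none := by
  induction L with
  | nil => simp [PySem.Dict.get?]
  | cons a L ih =>
    simp only [List.map_cons, PySem.Dict.get?_mk_cons, List.mem_cons]
    by_cases h : a = n
    · subst h; simp
    · simp [h, Ne.symm h, ih]

theorem get?_mk_append (l1 l2 : List (Int × List Int)) (n : Int) :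
    (PySem.Dict.mk (l1 ++ l2)).get? n =
      ((PySem.Dict.mk l1).get? n).or ((PySem.Dict.mk l2).get? n) := by
  induction l1 with
  | nil => simp [PySem.Dict.get?]
  | cons p l1 ih =>
    obtain ⟨k, v⟩ := p
    simp only [List.cons_append, PySem.Dict.get?_mk_cons]
    by_cases h : k == n
    · simp [h]
    · simp [h, ih]

theorem get?_pvState (S1 ys : List Int) (n : Int) :
    (PySem.Dict.mk (pvState S1 ys)).get? n =
      if n ∈ S1 then some (if ys.contains n then [1, 2] else [1])
      else if n ∈ ys then some [2] else none := by
  unfold pvState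
  rw [get?_mk_append, get?_mk_map, get?_mk_map]
  by_cases h1 : n ∈ S1
  · simp [h1]
  · by_cases h2 : n ∈ ys <;>
      simp [h1, h2, List.mem_filter]

-- one step of the second loop moves the state from prefix ys to prefix ys ++ [n]
theorem step2_pvState (S1 ys : List Int) (n : Int) :
    (if !(pvTruthy ((PySem.Dict.mk (pvState S1 ys)).get? n))
      then (PySem.Dict.mk (pvState S1 ys)).insert n [2]
      else if (PySem.Dict.mk (pvState S1 ys)).get? n = some [1]
        then (PySem.Dict.mk (pvState S1 ys)).insert n [1, 2]
        else PySem.Dict.mk (pvState S1 ys)) = PySem.Dict.mk (pvState S1 (ys ++ [n])) := by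
  have hget := get?_pvState S1 ys n
  have hdedup : PySem.List.dedup (ys ++ [n]) =
      if n ∈ ys then PySem.List.dedup ys else PySem.List.dedup ys ++ [n] := by
    simp only [PySem.List.dedup_eq_ofList]
    have : PySem.Set.ofList (ys ++ [n]) = PySem.Set.add (PySem.Set.ofList ys) n := by
      simp [PySem.Set.ofList_eq_foldl]
    rw [this, PySem.Set.add_eq_ite]
    simp [PySem.Set.mem_ofList]
  by_cases h1 : n ∈ S1
  · by_cases h2 : n ∈ ys
    · -- value is [1,2]: truthy, ≠ [1], dict unchanged; the state is also unchanged
      have hval : (PySem.Dict.mk (pvState S1 ys)).get? n = some [1, 2] := by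
        rw [hget]; simp [h1, List.contains_eq_mem, h2]
      rw [hval, if_neg (by decide : ¬ ((!pvTruthy (some ([1, 2] : List Int))) = true)),
        if_neg (by decide : ¬ ((some [1, 2] : Option (List Int)) = some [1]))]
      congr 1
      unfold pvState
      rw [hdedup]; simp only [h2, if_true]
      congr 1
      apply List.map_congr_left
      intro m _
      by_cases hmn : m = n
      · subst hmn; simp [h2]
      · simp [List.contains_eq_mem, hmn]
    · -- value is [1]: truthy and = [1] → overwritten in place to [1,2]
      have hval : (PySem.Dict.mk (pvState S1 ys)).get? n = some [1] := by
        rw [hget]; simp [h1, List.contains_eq_mem, h2]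
      rw [hval, if_neg (by decide : ¬ ((!pvTruthy (some ([1] : List Int))) = true)),
        if_pos (rfl : (some [1] : Option (List Int)) = some [1])]
      have hcont : (PySem.Dict.mk (pvState S1 ys)).contains n = true := by
        rw [PySem.Dict.contains_eq_isSome_get?, hval]; rfl
      rw [PySem.Dict.ext_iff, PySem.Dict.items_insert_of_contains _ _ hcont]
      have hitems : (PySem.Dict.mk (pvState S1 ys)).items = pvState S1 ys := rfl
      rw [hitems]
      unfold pvState
      rw [hdedup]; simp only [h2, if_false, List.map_append]
      have hfilter : ((PySem.List.dedup ys ++ [n]).filter fun m => !S1.contains m) =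
          (PySem.List.dedup ys).filter fun m => !S1.contains m := by
        rw [List.filter_append]
        simp [List.contains_eq_mem, h1]
      rw [hfilter]
      congr 1
      · rw [List.map_map]
        apply List.map_congr_left
        intro m _
        by_cases hmn : m = n
        · subst hmn; simp
        · simp [Function.comp, hmn, List.contains_eq_mem]
      · rw [List.map_map]
        apply List.map_congr_left
        intro m hm
        have : m ≠ n := by
          rintro rfl
          simp [List.mem_filter, List.contains_eq_mem, h1] at hm
        simp [Function.comp, this]
  · by_cases h2 : n ∈ ys
    · -- value is [2]: truthy, ≠ [1], dict unchanged; state unchanged too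
      have hval : (PySem.Dict.mk (pvState S1 ys)).get? n = some [2] := by
        rw [hget]; simp [h1, h2]
      rw [hval, if_neg (by decide : ¬ ((!pvTruthy (some ([2] : List Int))) = true)),
        if_neg (by decide : ¬ ((some [2] : Option (List Int)) = some [1]))]
      congr 1
      unfold pvState
      rw [hdedup]; simp only [h2, if_true]
      congr 1
      apply List.map_congr_left
      intro m _
      by_cases hmn : m = n
      · subst hmn; simp [h2]
      · simp [List.contains_eq_mem, hmn]
    · -- missing key: not truthy → fresh insert of [2] appends
      have hval : (PySem.Dict.mk (pvState S1 ys)).get? n = none := by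
        rw [hget]; simp [h1, h2]
      rw [hval, if_pos (by decide : (!pvTruthy (none : Option (List Int))) = true)]
      have hcont : (PySem.Dict.mk (pvState S1 ys)).contains n = false := by
        rw [PySem.Dict.contains_eq_isSome_get?, hval]; rfl
      rw [PySem.Dict.ext_iff, PySem.Dict.items_insert_of_not_contains _ _ hcont]
      have hitems : (PySem.Dict.mk (pvState S1 ys)).items = pvState S1 ys := rfl
      rw [hitems]
      unfold pvState
      rw [hdedup]; simp only [h2, if_false, List.append_assoc]
      congr 1
      · apply List.map_congr_left
        intro m hm
        have : m ≠ n := fun h => h1 (h ▸ hm)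
        simp [List.contains_eq_mem, this]
      · rw [List.filter_append]
        simp [List.contains_eq_mem, h1]

theorem loop2_pvState (l : List Int) (S1 ys : List Int) :
    (l.foldl (fun d number =>
        if !(pvTruthy (d.get? number)) then d.insert number [2]
        else if d.get? number = some [1] then d.insert number [1, 2]
        else d) (PySem.Dict.mk (pvState S1 ys))) = PySem.Dict.mk (pvState S1 (ys ++ l)) := by
  induction l generalizing ys with
  | nil => simp
  | cons n l ih =>
    simp only [List.foldl_cons]
    rw [step2_pvState S1 ys n, ih (ys ++ [n])]
    simp

theorem loop1_pvState (l S : List Int) :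
    (l.foldl (fun d number =>
        if !(pvTruthy (d.get? number)) then d.insert number [1] else d)
        (PySem.Dict.mk (pvState S []))) = PySem.Dict.mk (pvState (PySem.Set.update S l) []) := by
  induction l generalizing S with
  | nil => simp [PySem.Set.update]
  | cons n l ih =>
    simp only [List.foldl_cons]
    have hget := get?_pvState S [] n
    simp only [List.not_mem_nil, if_false, List.contains_nil, Bool.false_eq_true] at hget
    have hstep : (if !(pvTruthy ((PySem.Dict.mk (pvState S [])).get? n))
        then (PySem.Dict.mk (pvState S [])).insert n [1]
        else PySem.Dict.mk (pvState S [])) = PySem.Dict.mk (pvState (PySem.Set.add S n) []) := by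
      by_cases h1 : n ∈ S
      · rw [hget, if_pos h1,
          if_neg (by decide : ¬ ((!pvTruthy (some ([1] : List Int))) = true))]
        rw [PySem.Set.add_of_mem h1]
      · rw [hget, if_neg h1,
          if_pos (by decide : (!pvTruthy (none : Option (List Int))) = true)]
        have hcont : (PySem.Dict.mk (pvState S [])).contains n = false := by
          rw [PySem.Dict.contains_eq_isSome_get?, hget]; simp [h1]
        rw [PySem.Dict.ext_iff, PySem.Dict.items_insert_of_not_contains _ _ hcont]
        have hitems : (PySem.Dict.mk (pvState S [])).items = pvState S [] := rfl
        rw [hitems, PySem.Set.add_of_not_mem h1]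
        unfold pvState
        simp
    rw [hstep, ih (PySem.Set.add S n)]
    rfl

theorem contains_dedup (l : List Int) (n : Int) :
    (PySem.List.dedup l).contains n = l.contains n := by
  simp [List.contains_eq_mem]

-- ---- B-side lemmas ----

-- the product fold splits into its two independent component folds
theorem pvFold_split (l : List (Int × Int)) (a b : PySem.Dict Int Int) :
    (l.foldl (fun (fl : PySem.Dict Int Int × PySem.Dict Int Int) p =>
        let fl := if fl.1.contains p.2 then fl else (fl.1.insert p.2 p.1, fl.2)
        (fl.1, fl.2.insert p.2 p.1)) (a, b)) =
      (l.foldl (fun d p => if d.contains p.2 then d else d.insert p.2 p.1) a,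
       l.foldl (fun d p => d.insert p.2 p.1) b) := by
  induction l generalizing a b with
  | nil => rfl
  | cons p l ih =>
    simp only [List.foldl_cons]
    by_cases h : a.contains p.2 <;> simp [h, ih]

theorem first_get? (l : List Int) (s : Int) (d : PySem.Dict Int Int) (n : Int) :
    ((PySem.List.enumerate l s).foldl
        (fun d p => if d.contains p.2 then d else d.insert p.2 p.1) d).get? n =
      (d.get? n).or (if n ∈ l then some (s + (l.idxOf n : Int)) else none) := by
  induction l generalizing s d with
  | nil => simp
  | cons x l ih =>
    rw [PySem.List.enumerate_cons, List.foldl_cons]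
    dsimp only
    by_cases hc : d.contains x
    · rw [if_pos hc, ih]
      by_cases hnx : n = x
      · subst hnx
        have : (d.get? n).isSome := by
          rw [← PySem.Dict.contains_eq_isSome_get?]; exact hc
        obtain ⟨v, hv⟩ := Option.isSome_iff_exists.mp this
        simp [hv]
      · simp only [List.mem_cons, hnx, false_or]
        by_cases hml : n ∈ l
        · rw [if_pos hml, if_pos hml, List.idxOf_cons_ne _ (Ne.symm hnx)]
          have : s + 1 + ((l.idxOf n : Nat) : Int) = s + ((l.idxOf n : Nat) + 1 : Nat) := by
            push_cast; ring
          rw [this]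
        · simp [hml]
    · rw [if_neg hc, ih]
      by_cases hnx : n = x
      · subst hnx
        have hd : d.get? n = none := by
          cases hg : d.get? n with
          | none => rfl
          | some v =>
            exfalso; apply hc
            rw [PySem.Dict.contains_eq_isSome_get?, hg]; rfl
        rw [hd, PySem.Dict.get?_insert_self]
        simp [List.idxOf_cons_self]
      · rw [PySem.Dict.get?_insert_of_ne _ _ hnx]
        simp only [List.mem_cons, hnx, false_or]
        by_cases hml : n ∈ l
        · rw [if_pos hml, if_pos hml, List.idxOf_cons_ne _ (Ne.symm hnx)]
          have : s + 1 + ((l.idxOf n : Nat) : Int) = s + ((l.idxOf n : Nat) + 1 : Nat) := by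
            push_cast; ring
          rw [this]
        · simp [hml]

theorem first_keys (l : List Int) (s : Int) (d : PySem.Dict Int Int) :
    ((PySem.List.enumerate l s).foldl
        (fun d p => if d.contains p.2 then d else d.insert p.2 p.1) d).keys =
      PySem.Set.update d.keys l := by
  induction l generalizing s d with
  | nil => simp [PySem.Set.update]
  | cons x l ih =>
    rw [PySem.List.enumerate_cons, List.foldl_cons]
    dsimp only
    have hupd : PySem.Set.update d.keys (x :: l) = PySem.Set.update (PySem.Set.add d.keys x) l := rfl
    rw [hupd]
    by_cases hc : d.contains x
    · rw [if_pos hc, ih]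
      congr 1
      rw [PySem.Set.add_of_mem ((PySem.Dict.contains_iff_mem_keys _ _).mp hc)]
    · rw [if_neg hc, ih]
      congr 1
      have hc' : d.contains x = false := by simpa using hc
      rw [PySem.Dict.keys_insert_of_not_contains _ _ hc',
        PySem.Set.add_of_not_mem (fun h => hc ((PySem.Dict.contains_iff_mem_keys _ _).mpr h))]

theorem first_nodup_keys (l : List Int) (s : Int) (d : PySem.Dict Int Int)
    (h : d.keys.Nodup) :
    ((PySem.List.enumerate l s).foldl
        (fun d p => if d.contains p.2 then d else d.insert p.2 p.1) d).keys.Nodup := by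
  induction l generalizing s d with
  | nil => simpa
  | cons x l ih =>
    rw [PySem.List.enumerate_cons, List.foldl_cons]
    dsimp only
    by_cases hc : d.contains x
    · rw [if_pos hc]; exact ih _ _ h
    · rw [if_neg hc]
      apply ih
      exact PySem.Dict.nodup_keys_insert _ _ _ h

-- the overwriting fold (last): membership gives a value in [t, t + len), absence leaves d
theorem last_get? (l : List Int) (t : Int) (d : PySem.Dict Int Int) (n : Int) :
    (n ∈ l → ∃ j, ((PySem.List.enumerate l t).foldl
        (fun d p => d.insert p.2 p.1) d).get? n = some j ∧ t ≤ j ∧ j < t + l.length) ∧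
    (n ∉ l → ((PySem.List.enumerate l t).foldl
        (fun d p => d.insert p.2 p.1) d).get? n = d.get? n) := by
  induction l generalizing t d with
  | nil => simp
  | cons x l ih =>
    rw [PySem.List.enumerate_cons, List.foldl_cons]
    dsimp only
    constructor
    · intro hmem
      by_cases hml : n ∈ l
      · obtain ⟨j, hj, hj1, hj2⟩ := (ih (t + 1) (d.insert x t)).1 hml
        exact ⟨j, hj, by omega, by simp only [List.length_cons]; push_cast at *; omega⟩
      · have hnx : n = x := by
          rcases List.mem_cons.mp hmem with h | h
          · exact h
          · exact absurd h hml
        subst hnx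
        refine ⟨t, ?_, le_refl t, by simp only [List.length_cons]; push_cast; omega⟩
        rw [(ih (t + 1) (d.insert n t)).2 hml, PySem.Dict.get?_insert_self]
    · intro hmem
      have hnx : n ≠ x := fun h => hmem (h ▸ List.mem_cons_self)
      have hml : n ∉ l := fun h => hmem (List.mem_cons_of_mem _ h)
      rw [(ih (t + 1) (d.insert x t)).2 hml, PySem.Dict.get?_insert_of_ne _ _ hnx]

-- ordered dedup of an append: first block's distinct values, then the second's new ones
theorem dedup_append (l1 l2 : List Int) :
    PySem.List.dedup (l1 ++ l2) =
      PySem.List.dedup l1 ++ (PySem.List.dedup l2).filter (fun x => !l1.contains x) := by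
  induction l2 using List.reverseRecOn with
  | nil => simp
  | append_singleton l2 x ih =>
    have h1 : PySem.List.dedup (l1 ++ (l2 ++ [x])) = PySem.List.dedup ((l1 ++ l2) ++ [x]) := by
      rw [List.append_assoc]
    rw [h1]
    have hstep : ∀ (m : List Int), PySem.List.dedup (m ++ [x]) =
        if x ∈ m then PySem.List.dedup m else PySem.List.dedup m ++ [x] := by
      intro m
      simp only [PySem.List.dedup_eq_ofList]
      have : PySem.Set.ofList (m ++ [x]) = PySem.Set.add (PySem.Set.ofList m) x := by
        simp [PySem.Set.ofList_eq_foldl]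
      rw [this, PySem.Set.add_eq_ite]
      simp [PySem.Set.mem_ofList]
    rw [hstep (l1 ++ l2), ih, hstep l2]
    by_cases hx1 : x ∈ l1
    · rw [if_pos (List.mem_append.mpr (Or.inl hx1))]
      by_cases hx2 : x ∈ l2
      · rw [if_pos hx2]
      · rw [if_neg hx2, List.filter_append]
        simp [List.contains_eq_mem, hx1]
    · by_cases hx2 : x ∈ l2
      · rw [if_pos (List.mem_append.mpr (Or.inr hx2)), if_pos hx2]
      · rw [if_neg (by simp [hx1, hx2]), if_neg hx2, List.filter_append]
        simp [List.contains_eq_mem, hx1]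

-- ===== VERDICT (by name: the statement is the Claim_ definition above) =====
theorem get_seen_values_spec : Claim_equal_get_seen_values := by
  intro numbers numbers2 _
  unfold Spec_get_seen_values get_seen_values get_seen_values_alt
  dsimp only
  -- A's side: items = pvState (dedup numbers) numbers2
  have hempty : (PySem.Dict.empty : PySem.Dict Int (List Int)) = PySem.Dict.mk (pvState [] []) := by
    rfl
  rw [hempty, loop1_pvState]
  have hS : PySem.Set.update [] numbers = PySem.List.dedup numbers := by
    simp [PySem.List.dedup_eq_ofList, PySem.Set.ofList_eq_foldl, PySem.Set.update]
  rw [hS]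
  have hA := loop2_pvState numbers2 (PySem.List.dedup numbers) []
  simp only [List.nil_append] at hA
  rw [hA]
  have hitems : (PySem.Dict.mk (pvState (PySem.List.dedup numbers) numbers2)).items =
      pvState (PySem.List.dedup numbers) numbers2 := rfl
  rw [hitems]
  -- B's side
  rw [pvFold_split]
  set combined := numbers ++ numbers2 with hcomb
  set cut : Int := (numbers.length : Int) with hcut
  set F := (PySem.List.enumerate combined 0).foldl
    (fun d p => if d.contains p.2 then d else d.insert p.2 p.1)
    (PySem.Dict.empty : PySem.Dict Int Int) with hF
  set L := (PySem.List.enumerate combined 0).foldl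
    (fun d p => d.insert p.2 p.1) (PySem.Dict.empty : PySem.Dict Int Int) with hL
  have hFkeys : F.keys = PySem.List.dedup combined := by
    rw [hF, first_keys]
    simp [PySem.List.dedup_eq_ofList, PySem.Set.ofList_eq_foldl, PySem.Set.update,
      PySem.Dict.keys_empty]
  have hFnodup : F.keys.Nodup := by
    rw [hF]; exact first_nodup_keys _ _ _ PySem.Dict.nodup_keys_empty
  have hFitems : F.items = (PySem.List.dedup combined).map (fun n => (n, F.getD n 0)) := by
    rw [PySem.Dict.items_eq_map_keys F hFnodup 0, hFkeys]
  rw [hFitems, List.map_map]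
  -- last dict split: process numbers, then numbers2 starting at index cut
  have hLsplit : L = (PySem.List.enumerate numbers2 cut).foldl
      (fun d p => d.insert p.2 p.1)
      ((PySem.List.enumerate numbers 0).foldl (fun d p => d.insert p.2 p.1)
        (PySem.Dict.empty : PySem.Dict Int Int)) := by
    rw [hL, hcomb, PySem.List.enumerate_append, List.foldl_append]
    norm_num [hcut]
  -- pointwise characterisation of the two tag conditions
  have hFval : ∀ n ∈ PySem.List.dedup combined,
      (F.getD n 0 < cut) = (n ∈ numbers) := by
    intro n hn
    have hnc : n ∈ combined := (PySem.List.mem_dedup _ _).mp hn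
    have hg : F.get? n = some ((combined.idxOf n : Nat) : Int) := by
      rw [hF, first_get?]
      simp [hnc, PySem.Dict.get?_empty]
    have hgd : F.getD n 0 = ((combined.idxOf n : Nat) : Int) :=
      PySem.Dict.getD_of_get?_eq_some _ 0 hg
    rw [hgd]
    by_cases h1 : n ∈ numbers
    · have : List.idxOf n combined < numbers.length := by
        rw [hcomb, List.idxOf_append_of_mem h1]
        exact List.idxOf_lt_length_of_mem h1
      simp only [hcut, h1, eq_iff_iff, iff_true]
      exact_mod_cast this
    · have hn2 : n ∈ numbers2 := by
        rcases List.mem_append.mp hnc with h | h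
        · exact absurd h h1
        · exact h
      have : numbers.length ≤ List.idxOf n combined := by
        rw [hcomb, List.idxOf_append_of_notMem h1]
        omega
      simp only [hcut, h1, eq_iff_iff, iff_false, not_lt]
      exact_mod_cast this
  have hLval : ∀ n ∈ PySem.List.dedup combined,
      (cut ≤ L.getD n 0) = (n ∈ numbers2) := by
    intro n hn
    have hnc : n ∈ combined := (PySem.List.mem_dedup _ _).mp hn
    by_cases h2 : n ∈ numbers2
    · obtain ⟨j, hj, hj1, _⟩ := (last_get? numbers2 cut
        ((PySem.List.enumerate numbers 0).foldl (fun d p => d.insert p.2 p.1)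
          (PySem.Dict.empty : PySem.Dict Int Int)) n).1 h2
      have hLg : L.get? n = some j := by rw [hLsplit]; exact hj
      rw [PySem.Dict.getD_of_get?_eq_some _ 0 hLg]
      simp [h2, hj1]
    · have h1 : n ∈ numbers := by
        rcases List.mem_append.mp hnc with h | h
        · exact h
        · exact absurd h h2
      obtain ⟨j, hj, hj1, hj2⟩ := (last_get? numbers 0 PySem.Dict.empty n).1 h1
      have hLg : L.get? n = some j := by
        rw [hLsplit, (last_get? numbers2 cut _ n).2 h2]; exact hj
      rw [PySem.Dict.getD_of_get?_eq_some _ 0 hLg]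
      simp only [h2, eq_iff_iff, iff_false, not_le, hcut]
      omega
  -- assemble
  have hBmap : (PySem.List.dedup combined).map
        (fun n => (n, (if F.getD n 0 < cut then [1] else ([] : List Int)) ++
          (if cut ≤ L.getD n 0 then [2] else []))) =
      (PySem.List.dedup combined).map
        (fun n => (n, (if n ∈ numbers then [1] else ([] : List Int)) ++
          (if n ∈ numbers2 then [2] else []))) := by
    apply List.map_congr_left
    intro n hn
    have e1 := hFval n hn
    have e2 := hLval n hn
    simp only [eq_iff_iff] at e1 e2
    simp only [e1, e2]
  have hsplit := dedup_append numbers numbers2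
  rw [show ((fun (q : Int × Int) =>
        (q.1, (if q.2 < cut then [1] else ([] : List Int)) ++
          (if cut ≤ L.getD q.1 0 then [2] else []))) ∘
        (fun n => (n, F.getD n 0))) =
      (fun n => (n, (if F.getD n 0 < cut then [1] else ([] : List Int)) ++
        (if cut ≤ L.getD n 0 then [2] else []))) from rfl]
  rw [hBmap, hsplit, List.map_append]
  unfold pvState
  simp only [contains_dedup]
  congr 1
  · apply List.map_congr_left
    intro n hn
    have h1 : n ∈ numbers := (PySem.List.mem_dedup _ _).mp hn
    by_cases h2 : n ∈ numbers2 <;> simp [h1, h2, List.contains_eq_mem]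
  · apply List.map_congr_left
    intro n hn
    rw [List.mem_filter] at hn
    have h2 : n ∈ numbers2 := (PySem.List.mem_dedup _ _).mp hn.1
    have h1 : n ∉ numbers := by
      have := hn.2
      simpa [List.contains_eq_mem] using this
    simp [h1, h2]
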